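-- pv_equiv track=rewrite | github.com/oguzkopan/careerrougelike | backend/agents/meeting_evaluation_agent.py | should_generate_tasks_for_meeting
-- ===== SOURCE A (Python) =====
-- from typing import List, Dict, Any, Optional
--
-- def should_generate_tasks_for_meeting(
--     meeting_type: str,
--     score: int,
--     topics: List[Dict[str, Any]],
--     meeting_objective: str
-- ) -> bool:
--     """
--     Determine if meeting should generate follow-up tasks based on type and performance.
--
--     Args:
--         meeting_type: Type of meeting
--         score: Participation score
--         topics: List of topics discussed
--         meeting_objective: Meeting objective
--
--     Returns:
--         True if tasks should be generated
--     """
--     # Don't generate tasks for poor performance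
--     if score < 60:
--         return False
--
--     # Meeting types that typically generate tasks
--     task_generating_types = ['project_review', 'stakeholder_presentation']
--
--     if meeting_type in task_generating_types:
--         return True
--
--     # Check if meeting objective or topics suggest action items
--     action_keywords = ['implement', 'build', 'create', 'develop', 'fix', 'improve', 'deliver']
--
--     objective_lower = meeting_objective.lower()
--     if any(keyword in objective_lower for keyword in action_keywords):
--         return True
--
--     # Check topics for action-oriented content
--     for topic in topics:
--         topic_text = f"{topic.get('question', '')} {topic.get('context', '')}".lower()
--         if any(keyword in topic_text for keyword in action_keywords):
--             return True
--
--     return False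
-- ===== SOURCE B (Python) =====
-- def should_generate_tasks_for_meeting(
--     meeting_type: str,
--     score: int,
--     topics,
--     meeting_objective: str
-- ) -> bool:
--     if score < 60:
--         return False
--
--     if meeting_type in ['project_review', 'stakeholder_presentation']:
--         return True
--
--     # Build one space-joined lowercase corpus from the objective and every
--     # topic's question/context, then scan it once per keyword.  Keywords
--     # contain no spaces, so none can straddle a join boundary.
--     parts = [meeting_objective]
--     for topic in topics:
--         parts.append(topic.get('question', ''))
--         parts.append(topic.get('context', ''))
--     corpus = " ".join(parts).lower()
--
--     action_keywords = ['implement', 'build', 'create', 'develop', 'fix', 'improve', 'deliver']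
--     return any(keyword in corpus for keyword in action_keywords)
-- ===== Notes on version B (the rewrite author's own statement) =====
-- stated objective: simpler
-- what changed: B replaces A's three separate keyword scans (objective check, then a per-topic loop each building its own lowered text and re-scanning the keyword list) by building one space-joined lowercase corpus of all texts and doing a single any-keyword-in-corpus scan; equivalence rests on keywords containing no spaces.
import Mathlib
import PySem

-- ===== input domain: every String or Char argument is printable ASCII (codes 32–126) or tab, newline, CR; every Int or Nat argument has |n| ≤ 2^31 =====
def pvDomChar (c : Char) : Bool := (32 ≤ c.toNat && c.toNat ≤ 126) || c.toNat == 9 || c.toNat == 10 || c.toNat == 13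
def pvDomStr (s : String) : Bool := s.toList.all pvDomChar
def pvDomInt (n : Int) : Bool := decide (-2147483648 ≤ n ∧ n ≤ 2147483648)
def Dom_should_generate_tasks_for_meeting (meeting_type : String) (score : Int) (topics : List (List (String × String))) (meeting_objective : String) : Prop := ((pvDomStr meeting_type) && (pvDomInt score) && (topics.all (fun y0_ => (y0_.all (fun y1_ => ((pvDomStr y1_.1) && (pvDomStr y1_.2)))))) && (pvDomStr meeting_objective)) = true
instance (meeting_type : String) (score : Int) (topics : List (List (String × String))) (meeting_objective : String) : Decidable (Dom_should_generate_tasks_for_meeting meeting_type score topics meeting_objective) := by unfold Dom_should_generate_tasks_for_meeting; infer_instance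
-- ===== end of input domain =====

-- B builds one space-joined lowercase corpus of objective + all topic texts and scans it once
-- per keyword, replacing A's separate objective scan and per-topic scan loop (objective: simpler).

-- ===== PORT A =====
-- shared constant: the keyword list of the Python source (same literal in A and B)
def pvActionKeywords : List String :=
  ["implement", "build", "create", "develop", "fix", "improve", "deliver"]

-- 'for topic in topics: topic_text = …; if any(…): return True' / fall through to 'return False'
def pvTopicLoop (topics : List (List (String × String))) : Bool :=
  match topics with
  | [] => false
  | topic :: rest =>
    if pvActionKeywords.any (fun keyword => PySem.Str.isIn keyword (PySem.Str.lower
        ((PySem.Dict.mk topic).getD "question" "" ++ " " ++ (PySem.Dict.mk topic).getD "context" ""))) then true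
    else pvTopicLoop rest

def should_generate_tasks_for_meeting (meeting_type : String) (score : Int) (topics : List (List (String × String))) (meeting_objective : String) : Bool :=
  if score < 60 then false
  else if ["project_review", "stakeholder_presentation"].contains meeting_type then true
  -- objective_lower = meeting_objective.lower(); any(keyword in objective_lower …)
  else if pvActionKeywords.any (fun keyword =>
      PySem.Str.isIn keyword (PySem.Str.lower meeting_objective)) then true
  else pvTopicLoop topics

-- ===== PORT B =====
def should_generate_tasks_for_meeting_alt (meeting_type : String) (score : Int) (topics : List (List (String × String))) (meeting_objective : String) : Bool :=
  if score < 60 then false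
  else if ["project_review", "stakeholder_presentation"].contains meeting_type then true
  else
    -- parts = [objective]; for topic in topics: parts += [question, context]; corpus = " ".join(parts).lower()
    pvActionKeywords.any (fun keyword => PySem.Str.isIn keyword
      (PySem.Str.lower (PySem.Str.join " " (topics.foldl
        (fun parts topic =>
          parts ++ [(PySem.Dict.mk topic).getD "question" "", (PySem.Dict.mk topic).getD "context" ""])
        [meeting_objective]))))

-- ===== PRECONDITION & SPEC =====
def Spec_should_generate_tasks_for_meeting (meeting_type : String) (score : Int) (topics : List (List (String × String))) (meeting_objective : String) (out : Bool) : Prop := out = should_generate_tasks_for_meeting_alt meeting_type score topics meeting_objective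
instance (meeting_type : String) (score : Int) (topics : List (List (String × String))) (meeting_objective : String) (out : Bool) : Decidable (Spec_should_generate_tasks_for_meeting meeting_type score topics meeting_objective out) := by unfold Spec_should_generate_tasks_for_meeting; infer_instance

-- ===== CLAIM (what is proved, stated in full; the proofs are below) =====
def Claim_equal_should_generate_tasks_for_meeting : Prop := ∀ (meeting_type : String) (score : Int) (topics : List (List (String × String))) (meeting_objective : String), Dom_should_generate_tasks_for_meeting meeting_type score topics meeting_objective → Spec_should_generate_tasks_for_meeting meeting_type score topics meeting_objective (should_generate_tasks_for_meeting meeting_type score topics meeting_objective)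

-- ===== LEMMAS AND PROOFS =====

-- a space-free word is an infix of `a ++ ' ' :: b` iff it is an infix of `a` or of `b`
theorem pv_infix_space_split (sub a b : List Char) (h : ' ' ∉ sub) :
    sub <:+: (a ++ ' ' :: b) ↔ sub <:+: a ∨ sub <:+: b := by
  constructor
  · rintro ⟨s, t, hst⟩
    by_cases h1 : s.length + sub.length ≤ a.length
    · left
      have hpre : s ++ sub <+: a ++ ' ' :: b := ⟨t, by simpa using hst⟩
      have hpa : s ++ sub <+: a :=
        List.prefix_of_prefix_length_le hpre (List.prefix_append a (' ' :: b))
          (by simpa using h1)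
      exact (List.infix_append s sub []).trans (by simpa using hpa.isInfix)
    · by_cases h2 : a.length + 1 ≤ s.length
      · right
        have hsuf : sub ++ t <:+ a ++ ' ' :: b := ⟨s, by simpa using hst⟩
        have hlen : (sub ++ t).length ≤ b.length := by
          have := congrArg List.length hst
          simp at this
          simp
          omega
        have hpb : sub ++ t <:+ b :=
          List.suffix_of_suffix_length_le hsuf (by simpa using (List.suffix_append (a ++ [' ']) b)) hlen
        exact (List.infix_append [] sub t).trans (by simpa using hpb.isInfix)
      · exfalso
        apply h
        have hget : (s ++ sub ++ t)[a.length]? = some ' ' := by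
          rw [hst, List.getElem?_append_right (by omega)]
          simp
        rw [List.append_assoc, List.getElem?_append_right (by omega),
            List.getElem?_append_left (by omega)] at hget
        exact List.mem_of_getElem? hget
  · rintro (h | h)
    · exact h.trans ⟨[], ' ' :: b, by simp⟩
    · exact h.trans ⟨a ++ [' '], [], by simp⟩

-- a space-free word is in a space-join iff it is in one of the parts
theorem pv_infix_join_space (sub : List Char) (h : ' ' ∉ sub) :
    ∀ ps : List (List Char), ps ≠ [] →
      (sub <:+: PySem.Chars.join [' '] ps ↔ ∃ p ∈ ps, sub <:+: p) := by
  intro ps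
  induction ps with
  | nil => intro hne; exact absurd rfl hne
  | cons p rest ih =>
    intro _
    cases rest with
    | nil => simp [PySem.Chars.join_singleton]
    | cons q r =>
      rw [PySem.Chars.join_cons_cons]
      have he : p ++ [' '] ++ PySem.Chars.join [' '] (q :: r) = p ++ ' ' :: PySem.Chars.join [' '] (q :: r) := by simp
      rw [he, pv_infix_space_split sub _ _ h, ih (by simp)]
      simp

-- lowering commutes with the space-join
theorem pv_lower_join (ps : List (List Char)) :
    PySem.Chars.lower (PySem.Chars.join [' '] ps) = PySem.Chars.join [' '] (ps.map PySem.Chars.lower) := by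
  induction ps with
  | nil => rfl
  | cons p rest ih =>
    cases rest with
    | nil => simp [PySem.Chars.join_singleton]
    | cons q r =>
      rw [PySem.Chars.join_cons_cons]
      have h2 : PySem.Chars.join [' '] ((p :: q :: r).map PySem.Chars.lower)
          = PySem.Chars.lower p ++ [' '] ++ PySem.Chars.join [' '] ((q :: r).map PySem.Chars.lower) := by
        simp only [List.map_cons]
        exact PySem.Chars.join_cons_cons _ _ _ _
      rw [h2, ← ih]
      have hsp : PySem.Chars.lowerChar ' ' = ' ' := by decide
      simp [PySem.Chars.lower, hsp]

theorem pv_keywords_no_space : ∀ k ∈ pvActionKeywords, ' ' ∉ k.toList := by decide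

-- a keyword occurs in a lowered string
def pvHit (k : String) (s : String) : Prop :=
  k.toList <:+: PySem.Chars.lower s.toList

-- A's per-topic text: keyword in lower(q + " " + c) iff it hits q or c
theorem pv_text_iff (k q c : String) (hk : k ∈ pvActionKeywords) :
    PySem.Str.isIn k (PySem.Str.lower (q ++ " " ++ c)) = true ↔ pvHit k q ∨ pvHit k c := by
  rw [PySem.Str.isIn_iff_infix, PySem.Str.toList_lower]
  have ht : (q ++ " " ++ c).toList = q.toList ++ ' ' :: c.toList := by
    simp [String.toList_append]
  rw [ht]
  have hsp : PySem.Chars.lowerChar ' ' = ' ' := by decide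
  have hl : PySem.Chars.lower (q.toList ++ ' ' :: c.toList)
      = PySem.Chars.lower q.toList ++ ' ' :: PySem.Chars.lower c.toList := by
    simp [PySem.Chars.lower, hsp]
  rw [hl, pv_infix_space_split _ _ _ (pv_keywords_no_space k hk)]
  exact Iff.rfl

-- B's corpus: keyword in the joined lowered corpus iff it hits the objective or some topic field
theorem pv_corpus_iff (topics : List (List (String × String))) (obj k : String)
    (hk : k ∈ pvActionKeywords) :
    PySem.Str.isIn k (PySem.Str.lower (PySem.Str.join " "
        (obj :: topics.flatMap (fun topic =>
          [(PySem.Dict.mk topic).getD "question" "", (PySem.Dict.mk topic).getD "context" ""])))) = true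
    ↔ pvHit k obj ∨ ∃ t ∈ topics,
        pvHit k ((PySem.Dict.mk t).getD "question" "") ∨ pvHit k ((PySem.Dict.mk t).getD "context" "") := by
  rw [PySem.Str.isIn_iff_infix, PySem.Str.toList_lower, PySem.Str.toList_join]
  have hsep : (" " : String).toList = [' '] := rfl
  rw [hsep, pv_lower_join, pv_infix_join_space _ (pv_keywords_no_space k hk) _ (by simp)]
  simp only [pvHit, List.map_cons, List.mem_cons, List.map_flatMap,
    List.mem_flatMap, List.map_nil]
  constructor
  · rintro ⟨p, hp, hinf⟩
    rcases hp with rfl | ⟨t, ht, rfl | rfl | hfalse⟩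
    · exact Or.inl hinf
    · exact Or.inr ⟨t, ht, Or.inl hinf⟩
    · exact Or.inr ⟨t, ht, Or.inr hinf⟩
    · exact absurd hfalse (by simp)
  · rintro (h | ⟨t, ht, h | h⟩)
    · exact ⟨_, Or.inl rfl, h⟩
    · exact ⟨_, Or.inr ⟨t, ht, Or.inl rfl⟩, h⟩
    · exact ⟨_, Or.inr ⟨t, ht, Or.inr (Or.inl rfl)⟩, h⟩

-- A's topic loop returns true iff some topic is hit
theorem pv_topicLoop_iff (topics : List (List (String × String))) :
    pvTopicLoop topics = true ↔
      ∃ t ∈ topics, ∃ k ∈ pvActionKeywords,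
        pvHit k ((PySem.Dict.mk t).getD "question" "") ∨ pvHit k ((PySem.Dict.mk t).getD "context" "") := by
  induction topics with
  | nil => simp [pvTopicLoop]
  | cons t rest ih =>
    rw [pvTopicLoop]
    by_cases hc : pvActionKeywords.any (fun keyword => PySem.Str.isIn keyword (PySem.Str.lower
        ((PySem.Dict.mk t).getD "question" "" ++ " " ++ (PySem.Dict.mk t).getD "context" ""))) = true
    · rw [if_pos hc]
      simp only [List.any_eq_true] at hc
      obtain ⟨k, hk, hin⟩ := hc
      rw [pv_text_iff k _ _ hk] at hin
      constructor
      · intro _; exact ⟨t, by simp, k, hk, hin⟩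
      · intro _; rfl
    · rw [if_neg hc, ih]
      simp only [List.any_eq_true] at hc
      push Not at hc
      constructor
      · rintro ⟨t', ht', hrest⟩; exact ⟨t', by simp [ht'], hrest⟩
      · rintro ⟨t', ht', k, hk, hor⟩
        rcases List.mem_cons.mp ht' with rfl | ht'
        · exact absurd ((pv_text_iff k _ _ hk).mpr hor) (hc k hk)
        · exact ⟨t', ht', k, hk, hor⟩

-- ===== VERDICT (by name: the statement is the Claim_ definition above) =====
theorem should_generate_tasks_for_meeting_spec : Claim_equal_should_generate_tasks_for_meeting := by
  intro meeting_type score topics meeting_objective _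
  unfold Spec_should_generate_tasks_for_meeting
  unfold should_generate_tasks_for_meeting should_generate_tasks_for_meeting_alt
  by_cases hsc : score < 60
  · simp [hsc]
  · rw [if_neg hsc, if_neg hsc]
    by_cases hty : (["project_review", "stakeholder_presentation"] : List String).contains meeting_type = true
    · rw [if_pos hty, if_pos hty]
    · rw [if_neg hty, if_neg hty]
      rw [PySem.List.foldl_append_eq_flatMap
        (fun topic => [(PySem.Dict.mk topic).getD "question" "", (PySem.Dict.mk topic).getD "context" ""])]
      rw [List.singleton_append]
      apply Bool.eq_iff_iff.mpr
      constructor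
      · intro hA
        by_cases hob : pvActionKeywords.any (fun keyword =>
            PySem.Str.isIn keyword (PySem.Str.lower meeting_objective)) = true
        · simp only [List.any_eq_true] at hob ⊢
          obtain ⟨k, hk, hin⟩ := hob
          refine ⟨k, hk, (pv_corpus_iff topics meeting_objective k hk).mpr (Or.inl ?_)⟩
          rw [PySem.Str.isIn_iff_infix, PySem.Str.toList_lower] at hin
          exact hin
        · rw [if_neg hob] at hA
          rw [pv_topicLoop_iff] at hA
          obtain ⟨t, ht, k, hk, hor⟩ := hA
          simp only [List.any_eq_true]
          exact ⟨k, hk, (pv_corpus_iff topics meeting_objective k hk).mpr (Or.inr ⟨t, ht, hor⟩)⟩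
      · intro hB
        simp only [List.any_eq_true] at hB
        obtain ⟨k, hk, hin⟩ := hB
        rw [pv_corpus_iff topics meeting_objective k hk] at hin
        rcases hin with hobj | ⟨t, ht, hor⟩
        · have : pvActionKeywords.any (fun keyword =>
              PySem.Str.isIn keyword (PySem.Str.lower meeting_objective)) = true := by
            simp only [List.any_eq_true]
            exact ⟨k, hk, by rw [PySem.Str.isIn_iff_infix, PySem.Str.toList_lower]; exact hobj⟩
          rw [if_pos this]
        · by_cases hob : pvActionKeywords.any (fun keyword =>
              PySem.Str.isIn keyword (PySem.Str.lower meeting_objective)) = true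
          · rw [if_pos hob]
          · rw [if_neg hob, pv_topicLoop_iff]
            exact ⟨t, ht, k, hk, hor⟩
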